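-- pv_equiv track=rewrite | github.com/mfreema1/cs115-old | shallow_copy.py | find_max_coords_2D_alt
-- ===== SOURCE A (Python) =====
-- def find_max_coords_2D_alt(L):
--     max_val = L[0][0]
--     row = col = 0
--     for r in range(len(L)):
--         for c in range(len(L[r])):
--             if L[r][c] > max_val:
--                 max_val = L[r][c]
--                 row = r
--                 col = c
--     return row, col
-- ===== SOURCE B (Python) =====
-- def find_max_coords_2D_alt(L):
--     seed = L[0][0]
--     # phase 1: per non-empty row, earliest column holding that row's maximum
--     row_bests = []
--     for r, rl in enumerate(L):
--         if rl:
--             bc, bv = 0, rl[0]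
--             for c in range(1, len(rl)):
--                 if rl[c] > bv:
--                     bc, bv = c, rl[c]
--             row_bests.append((r, bc, bv))
--     # phase 2: pick the entry strictly beating the running best (earliest row on ties)
--     row, col, val = 0, 0, seed
--     for r, c, v in row_bests:
--         if v > val:
--             row, col, val = r, c, v
--     return row, col
-- ===== Notes on version B (the rewrite author's own statement) =====
-- stated objective: alternative
-- what changed: A fuses everything into one global running-max over nested index loops; B is a two-phase algorithm: it first computes per-row (row, best_col, best_val) summaries, then reduces that summary list with a strict comparison to pick the winning row.
import Mathlib
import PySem

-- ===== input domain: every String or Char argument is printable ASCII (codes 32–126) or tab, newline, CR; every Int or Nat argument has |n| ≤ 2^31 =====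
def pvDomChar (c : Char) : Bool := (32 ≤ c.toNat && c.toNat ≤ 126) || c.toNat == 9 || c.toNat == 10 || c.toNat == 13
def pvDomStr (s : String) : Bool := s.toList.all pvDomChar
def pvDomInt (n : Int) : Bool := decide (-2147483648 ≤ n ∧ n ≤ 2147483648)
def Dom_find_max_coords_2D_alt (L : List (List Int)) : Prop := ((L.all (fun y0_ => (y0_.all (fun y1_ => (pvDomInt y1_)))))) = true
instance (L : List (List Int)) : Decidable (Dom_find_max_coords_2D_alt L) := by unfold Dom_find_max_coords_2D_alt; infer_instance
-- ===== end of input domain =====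

-- B replaces A's fused nested running-max loops by a two-phase algorithm (per-row bests, then a reduce); equivalence is proved on Pre_ (inputs where Python A does not raise).

-- ===== PORT A =====
-- inner 'for c in range(len(L[r]))' loop: structural recursion over the row with a column counter; state (max_val, row, col)
def pvInnerA (r : Int) : List Int → Int → Int × Int × Int → Int × Int × Int
  | [], _, s => s
  | x :: xs, c, (v, ri, ci) => pvInnerA r xs (c + 1) (if x > v then (x, r, c) else (v, ri, ci))

-- outer 'for r in range(len(L))' loop: structural recursion over the rows with a row counter
def pvOuterA : List (List Int) → Int → Int × Int × Int → Int × Int × Int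
  | [], _, s => s
  | row :: rest, r, s => pvOuterA rest (r + 1) (pvInnerA r row 0 s)

def find_max_coords_2D_alt (L : List (List Int)) : Int × Int :=
  let max0 := (L.getD 0 []).getD 0 0   -- L[0][0]; Pre_ guarantees both indexings succeed, so the defaults are never used
  let s := pvOuterA L 0 (max0, 0, 0)
  (s.2.1, s.2.2)

-- ===== PORT B =====
-- inner scan of Source B: 'for c in range(1, len(rl))' carrying (bc, bv) with bv = rl[bc]
def pvRowBestB : List Int → Int → Int × Int → Int × Int
  | [], _, b => b
  | x :: xs, c, (bc, bv) => pvRowBestB xs (c + 1) (if x > bv then (c, x) else (bc, bv))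

-- phase 1 of Source B: collect (r, bc, bv) for every non-empty row
def pvRowBestsB : List (List Int) → Int → List (Int × Int × Int)
  | [], _ => []
  | [] :: rest, r => pvRowBestsB rest (r + 1)
  | (x :: xs) :: rest, r =>
      (r, pvRowBestB xs 1 (0, x)) :: pvRowBestsB rest (r + 1)

-- phase 2 of Source B: reduce the summaries, state (row, col, val)
def pvReduceB : List (Int × Int × Int) → Int × Int × Int → Int × Int × Int
  | [], s => s
  | t :: ts, s => pvReduceB ts (if t.2.2 > s.2.2 then t else s)

def find_max_coords_2D_alt_alt (L : List (List Int)) : Int × Int :=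
  let seed := (L.getD 0 []).getD 0 0   -- L[0][0]; Pre_ guarantees the defaults are never used
  let fin := pvReduceB (pvRowBestsB L 0) (0, 0, seed)
  (fin.1, fin.2.1)

-- ===== PRECONDITION & SPEC =====
-- Pre_ excludes exactly the inputs where Python A raises IndexError on 'L[0][0]': L empty, or its first row empty.
def Pre_find_max_coords_2D_alt (L : List (List Int)) : Prop := L ≠ [] ∧ L.headI ≠ []
instance (L : List (List Int)) : Decidable (Pre_find_max_coords_2D_alt L) := by unfold Pre_find_max_coords_2D_alt; infer_instance
def pvWitness_find_max_coords_2D_alt : List (List Int) := [[1, 2], [3]]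

def Spec_find_max_coords_2D_alt (L : List (List Int)) (out : Int × Int) : Prop := out = find_max_coords_2D_alt_alt L
instance (L : List (List Int)) (out : Int × Int) : Decidable (Spec_find_max_coords_2D_alt L out) := by unfold Spec_find_max_coords_2D_alt; infer_instance

-- ===== CLAIM (what is proved, stated in full; the proofs are below) =====
def Claim_equal_find_max_coords_2D_alt : Prop := ∀ (L : List (List Int)), Dom_find_max_coords_2D_alt L → Pre_find_max_coords_2D_alt L → Spec_find_max_coords_2D_alt L (find_max_coords_2D_alt L)

-- ===== LEMMAS AND PROOFS =====

-- the row scan of B either keeps its state or strictly improves the value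
theorem pvRowBestB_ge (xs : List Int) (c bc bv : Int) :
    pvRowBestB xs c (bc, bv) = (bc, bv) ∨ bv < (pvRowBestB xs c (bc, bv)).2 := by
  induction xs generalizing c bc bv with
  | nil => exact Or.inl rfl
  | cons x xs ih =>
    simp only [pvRowBestB]
    by_cases h : x > bv
    · simp only [if_pos h]
      rcases ih (c + 1) c x with h2 | h2
      · right; rw [h2]; exact h
      · right; omega
    · simp only [if_neg h]; exact ih _ _ _

-- A's inner scan from a state related to B's running (bc, bv) equals the B summary folded in once
theorem pvInner_rowBest (r : Int) (xs : List Int) (c bc bv v ri ci : Int)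
    (hinv : (v = bv ∧ ri = r ∧ ci = bc) ∨ bv ≤ v) :
    pvInnerA r xs c (v, ri, ci) =
      (if (pvRowBestB xs c (bc, bv)).2 > v
       then ((pvRowBestB xs c (bc, bv)).2, r, (pvRowBestB xs c (bc, bv)).1)
       else (v, ri, ci)) := by
  induction xs generalizing c bc bv v ri ci with
  | nil =>
    simp only [pvInnerA, pvRowBestB]
    rcases hinv with ⟨h1, h2, h3⟩ | h
    · subst h1 h2 h3; simp
    · rw [if_neg (by omega)]
  | cons x xs ih =>
    simp only [pvInnerA, pvRowBestB]
    by_cases hx : x > v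
    · have hxb : x > bv := by rcases hinv with ⟨h1, _, _⟩ | h <;> omega
      rw [if_pos hx, if_pos hxb, ih (c + 1) c x x r c (Or.inl ⟨rfl, rfl, rfl⟩)]
      rcases pvRowBestB_ge xs (c + 1) c x with h | h
      · rw [h]; simp [hx]
      · simp only [gt_iff_lt]
        rw [if_pos (by omega), if_pos (by omega)]
    · rw [if_neg hx]
      by_cases hb : x > bv
      · rw [if_pos hb]
        exact ih (c + 1) c x v ri ci (Or.inr (by omega))
      · rw [if_neg hb]
        exact ih (c + 1) bc bv v ri ci hinv
-- A's whole inner loop on a non-empty row, in terms of B's row summary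
theorem pvInner_full (r : Int) (x : Int) (xs : List Int) (v ri ci : Int) :
    pvInnerA r (x :: xs) 0 (v, ri, ci) =
      (if (pvRowBestB xs 1 (0, x)).2 > v
       then ((pvRowBestB xs 1 (0, x)).2, r, (pvRowBestB xs 1 (0, x)).1)
       else (v, ri, ci)) := by
  simp only [pvInnerA, zero_add]
  by_cases hx : x > v
  · rw [if_pos hx, pvInner_rowBest r xs 1 0 x x r 0 (Or.inl ⟨rfl, rfl, rfl⟩)]
    rcases pvRowBestB_ge xs 1 0 x with h | h
    · rw [h]; simp only [gt_iff_lt]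
      rw [if_neg (by omega), if_pos hx]
    · rw [if_pos (by omega), if_pos (by omega)]
  · rw [if_neg hx]
    exact pvInner_rowBest r xs 1 0 x v ri ci (Or.inr (by omega))

-- A's outer loop equals B's phase 1 + phase 2 under the state permutation (v,ri,ci) ↔ (ri,ci,v)
theorem pvOuter_eq (rest : List (List Int)) (r v ri ci : Int) :
    pvOuterA rest r (v, ri, ci) =
      ((pvReduceB (pvRowBestsB rest r) (ri, ci, v)).2.2,
       (pvReduceB (pvRowBestsB rest r) (ri, ci, v)).1,
       (pvReduceB (pvRowBestsB rest r) (ri, ci, v)).2.1) := by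
  induction rest generalizing r v ri ci with
  | nil => simp [pvOuterA, pvRowBestsB, pvReduceB]
  | cons row rest ih =>
    cases row with
    | nil =>
      simp only [pvOuterA, pvRowBestsB, pvInnerA]
      exact ih (r + 1) v ri ci
    | cons x xs =>
      simp only [pvOuterA, pvRowBestsB, pvReduceB, pvInner_full]
      by_cases h : (pvRowBestB xs 1 (0, x)).2 > v
      · simp only [gt_iff_lt] at h ⊢
        rw [if_pos h, if_pos h]
        exact ih (r + 1) _ _ _
      · simp only [gt_iff_lt] at h ⊢
        rw [if_neg h, if_neg h]
        exact ih (r + 1) v ri ci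

-- ===== VERDICT (by name: the statement is the Claim_ definition above) =====
theorem find_max_coords_2D_alt_spec : Claim_equal_find_max_coords_2D_alt := by
  intro L _ _
  unfold Spec_find_max_coords_2D_alt find_max_coords_2D_alt find_max_coords_2D_alt_alt
  simp only [pvOuter_eq]
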